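-- pv_equiv track=rewrite | github.com/b-s-c/advent2024 | d05/all.py | insert_to_list
-- ===== SOURCE A (Python) =====
-- def insert_to_list(lst, item, rule):
--     if len(rule) == 0 or len(lst) == 0:
--         lst.append(item)
--         return lst
--     earliest_slot = len(lst)
--     for val in rule:
--         if val in lst:
--             earliest_slot = min(earliest_slot, lst.index(val))
--         else:
--             continue
--
--     lst.insert(earliest_slot, item)
--     return lst
-- ===== SOURCE B (Python) =====
-- def insert_to_list(lst, item, rule):
--     earliest_slot = len(lst)
--     for i, x in enumerate(lst):
--         if x in rule:
--             earliest_slot = i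
--             break
--     lst.insert(earliest_slot, item)
--     return lst
-- ===== Notes on version B (the rewrite author's own statement) =====
-- stated objective: faster
-- what changed: Instead of scanning rule and taking the minimum of lst.index(val) over all matches, B makes a single forward scan of lst that stops at the first element belonging to rule (falling back to len(lst)) and inserts there; the empty-rule/empty-list special case disappears.
import Mathlib
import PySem

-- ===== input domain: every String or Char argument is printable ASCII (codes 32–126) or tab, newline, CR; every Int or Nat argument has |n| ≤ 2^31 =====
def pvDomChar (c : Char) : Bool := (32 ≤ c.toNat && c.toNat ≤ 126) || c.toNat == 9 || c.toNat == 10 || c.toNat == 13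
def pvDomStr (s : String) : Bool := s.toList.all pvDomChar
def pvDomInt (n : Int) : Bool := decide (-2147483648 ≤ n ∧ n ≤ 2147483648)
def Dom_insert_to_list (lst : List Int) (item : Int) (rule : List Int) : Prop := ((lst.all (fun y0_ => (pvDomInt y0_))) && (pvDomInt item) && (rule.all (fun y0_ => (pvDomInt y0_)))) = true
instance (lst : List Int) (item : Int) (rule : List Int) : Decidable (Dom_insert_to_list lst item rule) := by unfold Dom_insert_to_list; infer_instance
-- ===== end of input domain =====

-- B replaces A's scan over `rule` (taking min of lst.index) by a single forward scan of
-- lst that stops at the first element belonging to rule (alternative decomposition).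
-- Both A and B mutate lst in place in Python (append/insert); the equivalence here is
-- about the returned list, which is also the mutated state in both.

-- ===== PORT A =====
def insert_to_list (lst : List Int) (item : Int) (rule : List Int) : List Int :=
  if rule.length = 0 ∨ lst.length = 0 then lst ++ [item]
  else
    let earliest_slot : Nat := rule.foldl
      (fun acc val => if val ∈ lst then min acc ((PySem.List.index? lst val).getD 0) else acc)
      lst.length
    PySem.List.insert lst (earliest_slot : Int) item

-- ===== PORT B =====
-- the `for i, x in enumerate(lst): if x in rule: break` scan (first matching index, else len)
def findSlot (rule : List Int) : List Int → Nat → Nat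
  | [], i => i
  | x :: xs, i => if x ∈ rule then i else findSlot rule xs (i + 1)

def insert_to_list_alt (lst : List Int) (item : Int) (rule : List Int) : List Int :=
  PySem.List.insert lst ((findSlot rule lst 0 : Nat) : Int) item

-- ===== PRECONDITION & SPEC =====
def Spec_insert_to_list (lst : List Int) (item : Int) (rule : List Int) (out : List Int) : Prop := out = insert_to_list_alt lst item rule
instance (lst : List Int) (item : Int) (rule : List Int) (out : List Int) : Decidable (Spec_insert_to_list lst item rule out) := by unfold Spec_insert_to_list; infer_instance

-- ===== CLAIM (what is proved, stated in full; the proofs are below) =====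
def Claim_equal_insert_to_list : Prop := ∀ (lst : List Int) (item : Int) (rule : List Int), Dom_insert_to_list lst item rule → Spec_insert_to_list lst item rule (insert_to_list lst item rule)

-- ===== LEMMAS AND PROOFS =====

-- B's scan is List.findIdx shifted by the start counter
theorem findSlot_eq_findIdx (rule : List Int) (lst : List Int) (i : Nat) :
    findSlot rule lst i = i + lst.findIdx (fun x => decide (x ∈ rule)) := by
  induction lst generalizing i with
  | nil => simp [findSlot]
  | cons x xs ih =>
    by_cases h : x ∈ rule
    · simp [findSlot, h, List.findIdx_cons]
    · simp [findSlot, h, List.findIdx_cons, ih]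
      omega

-- A's accumulator never grows
theorem foldl_min_le (lst rule : List Int) (acc : Nat) :
    rule.foldl (fun acc val => if val ∈ lst then min acc ((PySem.List.index? lst val).getD 0) else acc) acc ≤ acc := by
  induction rule generalizing acc with
  | nil => simp
  | cons v vs ih =>
    simp only [List.foldl_cons]
    refine le_trans (ih _) ?_
    split_ifs <;> omega

-- A's fold result is bounded by the index of any rule member that occurs in lst
theorem foldl_min_le_idx (lst : List Int) (rule : List Int) (acc : Nat) (v : Int)
    (hv : v ∈ rule) (hvl : v ∈ lst) :
    rule.foldl (fun acc val => if val ∈ lst then min acc ((PySem.List.index? lst val).getD 0) else acc) acc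
      ≤ (PySem.List.index? lst v).getD 0 := by
  induction rule generalizing acc with
  | nil => cases hv
  | cons w ws ih =>
    simp only [List.foldl_cons]
    rcases List.mem_cons.mp hv with h | h
    · subst h
      refine le_trans (foldl_min_le lst ws _) ?_
      simp [hvl]
    · exact ih _ h

-- any lower bound of the accumulator and of every reachable index bounds A's fold result
theorem le_foldl_min (lst rule : List Int) (J acc : Nat) (hacc : J ≤ acc)
    (hidx : ∀ v ∈ rule, v ∈ lst → J ≤ (PySem.List.index? lst v).getD 0) :
    J ≤ rule.foldl (fun acc val => if val ∈ lst then min acc ((PySem.List.index? lst val).getD 0) else acc) acc := by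
  induction rule generalizing acc with
  | nil => simpa using hacc
  | cons w ws ih =>
    simp only [List.foldl_cons]
    refine ih _ ?_ (fun v hv hvl => hidx v (List.mem_cons_of_mem _ hv) hvl)
    by_cases hw : w ∈ lst
    · simp only [hw, if_true]
      exact le_min hacc (hidx w List.mem_cons_self hw)
    · simpa [hw] using hacc

-- if no element of lst lies in rule, A's fold leaves the accumulator unchanged
theorem foldl_min_of_no_match (lst rule : List Int) (acc : Nat)
    (h : ∀ x ∈ lst, x ∉ rule) :
    rule.foldl (fun acc val => if val ∈ lst then min acc ((PySem.List.index? lst val).getD 0) else acc) acc = acc := by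
  induction rule generalizing acc with
  | nil => rfl
  | cons w ws ih =>
    have hw : w ∉ lst := fun hwl => (h w hwl) (List.mem_cons_self)
    have hws : ∀ x ∈ lst, x ∉ ws := fun x hx hxw => (h x hx) (List.mem_cons_of_mem _ hxw)
    simp only [List.foldl_cons, hw, if_false]
    exact ih _ hws

-- the first index of a value of lst never exceeds the position it was read at
theorem index_le_pos (lst : List Int) (j : Nat) (hj : j < lst.length) :
    (PySem.List.index? lst (lst[j]'hj)).getD 0 ≤ j := by
  have hs : (PySem.List.index? lst (lst[j]'hj)).isSome :=
    (PySem.List.index?_isSome_iff _ _).mpr (List.getElem_mem hj)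
  obtain ⟨k, hk⟩ := Option.isSome_iff_exists.mp hs
  obtain ⟨hklt, hval, hfirst⟩ := PySem.List.getElem_of_index?_eq_some hk
  rw [hk]
  simp only [Option.getD_some]
  exact Nat.le_of_not_lt (fun hlt => hfirst _ hlt rfl)

-- the central identity: A's min-over-rule fold from len equals B's first-match scan
theorem foldl_min_eq_findSlot (lst rule : List Int) :
    rule.foldl (fun acc val => if val ∈ lst then min acc ((PySem.List.index? lst val).getD 0) else acc) lst.length
      = findSlot rule lst 0 := by
  rw [findSlot_eq_findIdx]
  simp only [Nat.zero_add]
  set p : Int → Bool := fun x => decide (x ∈ rule) with hp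
  by_cases hJ : lst.findIdx p < lst.length
  · -- some element of lst is in rule
    have hpJ : p (lst[lst.findIdx p]'hJ) := List.findIdx_getElem
    have hmem : lst[lst.findIdx p]'hJ ∈ rule := by simpa [hp] using hpJ
    have hinl : lst[lst.findIdx p]'hJ ∈ lst := List.getElem_mem hJ
    apply Nat.le_antisymm
    · exact le_trans (foldl_min_le_idx lst rule lst.length _ hmem hinl) (index_le_pos lst _ hJ)
    · refine le_foldl_min lst rule _ _ List.findIdx_le_length ?_
      intro v hv hvl
      have hs : (PySem.List.index? lst v).isSome := (PySem.List.index?_isSome_iff lst v).mpr hvl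
      obtain ⟨k, hk⟩ := Option.isSome_iff_exists.mp hs
      obtain ⟨hklt, hval, _⟩ := PySem.List.getElem_of_index?_eq_some hk
      rw [hk]
      simp only [Option.getD_some]
      refine Nat.le_of_not_lt (fun hlt => ?_)
      have := List.not_of_lt_findIdx (p := p) (xs := lst) (i := k) hlt
      simp only [hp, decide_eq_false_iff_not] at this
      exact this (hval ▸ hv)
  · -- no element of lst is in rule: both sides are lst.length
    have hJ' : lst.findIdx p = lst.length :=
      Nat.le_antisymm List.findIdx_le_length (Nat.le_of_not_lt hJ)
    have hnom : ∀ x ∈ lst, x ∉ rule := by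
      intro x hx hxr
      exact hJ (List.findIdx_lt_length.mpr ⟨x, hx, by simpa [hp] using hxr⟩)
    rw [foldl_min_of_no_match lst rule _ hnom, hJ']

-- B's scan over lst with an empty rule reaches the end
theorem findSlot_nil_rule (lst : List Int) (i : Nat) :
    findSlot [] lst i = i + lst.length := by
  induction lst generalizing i with
  | nil => simp [findSlot]
  | cons x xs ih => simp [findSlot, ih]; omega

-- ===== VERDICT (by name: the statement is the Claim_ definition above) =====
theorem insert_to_list_spec : Claim_equal_insert_to_list := by
  intro lst item rule _
  unfold Spec_insert_to_list insert_to_list insert_to_list_alt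
  by_cases h : rule.length = 0 ∨ lst.length = 0
  · simp only [h, if_true]
    have hslot : findSlot rule lst 0 = lst.length := by
      rcases h with h | h
      · rw [List.length_eq_zero_iff.mp h, findSlot_nil_rule]; omega
      · rw [List.length_eq_zero_iff.mp h]; rfl
    rw [hslot, ← PySem.List.len_eq, PySem.List.insert_len]
  · simp only [h, if_false]
    rw [foldl_min_eq_findSlot]
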